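-- pv_equiv track=rewrite | github.com/claire-fletcher/coding-practice | python/freecode-daily-challenges/2025/2025-11-24-validation.py | is_valid_message
-- ===== SOURCE A (Python) =====
-- def is_valid_message(message, validation):
--     words = message.lower().split()
--     validation = validation.lower()
--
--     if len(words) != len(validation):
--         return False
--
--     # words[0][0] = validation[0]
--     # words[1][0] = validation[1]
--     # words[2][0] = validation[2] etc
--     for x in range(0, len(validation)):
--         if words[x][0] != validation[x]:
--             return False
--
--     return True
-- ===== SOURCE B (Python) =====
-- def is_valid_message(message, validation):
--     v = validation.lower()
--     k = 0              # index of the next expected initial in v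
--     in_word = False    # are we inside a word already checked?
--     for ch in message.lower():
--         if ch.isspace():
--             in_word = False
--         elif not in_word:
--             if k >= len(v) or ch != v[k]:
--                 return False
--             k += 1
--             in_word = True
--     return k == len(v)
-- ===== Notes on version B (the rewrite author's own statement) =====
-- stated objective: alternative
-- what changed: B never builds the word list: it streams the lowercased message once with a word-boundary state machine, matching each word's first character against a cursor into validation.lower() and failing early, then checks the cursor consumed all of validation; A splits into words, compares lengths, then re-indexes both sequences.
import Mathlib
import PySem

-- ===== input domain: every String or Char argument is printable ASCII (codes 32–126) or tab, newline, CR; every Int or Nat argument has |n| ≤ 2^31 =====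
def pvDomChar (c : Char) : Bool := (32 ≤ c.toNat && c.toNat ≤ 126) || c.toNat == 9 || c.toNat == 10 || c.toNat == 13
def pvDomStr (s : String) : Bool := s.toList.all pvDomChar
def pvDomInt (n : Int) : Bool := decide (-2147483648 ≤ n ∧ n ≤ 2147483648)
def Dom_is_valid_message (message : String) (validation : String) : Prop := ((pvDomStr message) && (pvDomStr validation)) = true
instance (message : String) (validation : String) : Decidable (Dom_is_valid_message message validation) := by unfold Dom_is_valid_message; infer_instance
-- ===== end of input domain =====

-- B is an alternative algorithm: instead of splitting into a word list and re-indexing it,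
-- B streams the lowercased message once with a word-boundary state machine and a cursor into
-- the lowercased validation string (objective: alternative, same cost).

-- ===== PORT A =====
-- the for-x-in-range loop with early 'return False'; words[x][0] / validation[x] via pyGet?
-- (the .getD defaults are unreachable: the length guard and non-empty split words keep every index in range)
def pvALoop (words : List (List Char)) (v : List Char) : List Int → Bool
  | [] => true
  | x :: xs =>
    if PySem.List.pyGet? ((PySem.List.pyGet? words x).getD []) 0 ≠ PySem.List.pyGet? v x then false
    else pvALoop words v xs

def is_valid_message (message : String) (validation : String) : Bool :=
  let words := PySem.Chars.split₀ (PySem.Chars.lower message.toList)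
  let v := PySem.Chars.lower validation.toList
  if words.length ≠ v.length then false
  else pvALoop words v (PySem.List.pyRange 0 v.length 1)

-- ===== PORT B =====
-- the for-ch loop over message.lower() with state (k, in_word); 'k >= len(v) or ch != v[k]'
-- is ported as pyGet? v k returning none (out of range) or a character to compare
def pvBScan (v : List Char) : List Char → Nat → Bool → Bool
  | [], k, _ => k == v.length
  | c :: cs, k, inWord =>
    if PySem.Chars.isspace c then pvBScan v cs k false
    else if inWord then pvBScan v cs k true
    else
      match PySem.List.pyGet? v (k : Int) with
      | none => false
      | some ch => if c ≠ ch then false else pvBScan v cs (k + 1) true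

def is_valid_message_alt (message : String) (validation : String) : Bool :=
  pvBScan (PySem.Chars.lower validation.toList) (PySem.Chars.lower message.toList) 0 false

-- ===== PRECONDITION & SPEC =====
def Spec_is_valid_message (message : String) (validation : String) (out : Bool) : Prop := out = is_valid_message_alt message validation
instance (message : String) (validation : String) (out : Bool) : Decidable (Spec_is_valid_message message validation out) := by unfold Spec_is_valid_message; infer_instance

-- ===== CLAIM (what is proved, stated in full; the proofs are below) =====
def Claim_equal_is_valid_message : Prop := ∀ (message : String) (validation : String), Dom_is_valid_message message validation → Spec_is_valid_message message validation (is_valid_message message validation)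

-- ===== LEMMAS AND PROOFS =====

-- the string of first letters of the whitespace-split words — the common characterization
def pvFirsts (s : List Char) : List Char := (PySem.Chars.split₀ s).map (fun w => w.headD ' ')

-- ---- split₀ recurrences ----
theorem pvGo_acc (s : List Char) : ∀ (cur : List Char) (acc : List (List Char)),
    PySem.Chars.split₀.go s cur acc = acc.reverse ++ PySem.Chars.split₀.go s cur [] := by
  induction s with
  | nil =>
    intro cur acc
    by_cases hc : cur.isEmpty = true <;> simp [PySem.Chars.split₀.go, hc]
  | cons c rest ih =>
    intro cur acc
    by_cases hs : PySem.Chars.isspace c = true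
    · by_cases hc : cur.isEmpty = true
      · simp only [PySem.Chars.split₀.go, hs, hc, if_true]
        exact ih [] acc
      · simp only [PySem.Chars.split₀.go, hs, hc, if_true, Bool.false_eq_true, if_false]
        rw [ih [] (cur.reverse :: acc), ih [] [cur.reverse]]
        simp
    · simp only [PySem.Chars.split₀.go, hs, Bool.false_eq_true, if_false]
      exact ih _ _

theorem pvSplit_nil : PySem.Chars.split₀ ([] : List Char) = [] := rfl

theorem pvSplit_space (c : Char) (cs : List Char) (hs : PySem.Chars.isspace c = true) :
    PySem.Chars.split₀ (c :: cs) = PySem.Chars.split₀ cs := by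
  show PySem.Chars.split₀.go (c :: cs) [] [] = PySem.Chars.split₀.go cs [] []
  simp [PySem.Chars.split₀.go, hs]

theorem pvGo_word (s : List Char) : ∀ (cur : List Char), cur ≠ [] →
    PySem.Chars.split₀.go s cur [] =
      (cur.reverse ++ s.takeWhile (fun d => !PySem.Chars.isspace d)) ::
        PySem.Chars.split₀ (s.dropWhile (fun d => !PySem.Chars.isspace d)) := by
  induction s with
  | nil =>
    intro cur hcur
    unfold PySem.Chars.split₀.go
    simp [List.isEmpty_iff, hcur, pvSplit_nil]
  | cons c rest ih =>
    intro cur hcur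
    by_cases hs : PySem.Chars.isspace c = true
    · have h1 : PySem.Chars.split₀.go (c :: rest) cur [] =
          PySem.Chars.split₀.go rest [] [cur.reverse] := by
        simp [PySem.Chars.split₀.go, hs, List.isEmpty_iff, hcur]
      have h2 : PySem.Chars.split₀.go rest ([] : List Char) [] = PySem.Chars.split₀ rest := rfl
      rw [h1, pvGo_acc, h2]
      simp [hs, pvSplit_space c rest hs]
    · have h1 : PySem.Chars.split₀.go (c :: rest) cur [] =
          PySem.Chars.split₀.go rest (c :: cur) [] := by
        simp [PySem.Chars.split₀.go, hs]
      rw [h1, ih (c :: cur) (by simp)]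
      simp [hs]
  
theorem pvSplit_word (c : Char) (cs : List Char) (hs : ¬ PySem.Chars.isspace c = true) :
    PySem.Chars.split₀ (c :: cs) =
      (c :: cs.takeWhile (fun d => !PySem.Chars.isspace d)) ::
        PySem.Chars.split₀ (cs.dropWhile (fun d => !PySem.Chars.isspace d)) := by
  unfold PySem.Chars.split₀
  conv_lhs => unfold PySem.Chars.split₀.go
  simp only [hs, if_false, Bool.false_eq_true]
  rw [pvGo_word cs [c] (by simp)]
  rfl

-- ---- pvFirsts recurrences ----
theorem pvFirsts_nil : pvFirsts [] = [] := rfl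

theorem pvFirsts_space (c : Char) (cs : List Char) (hs : PySem.Chars.isspace c = true) :
    pvFirsts (c :: cs) = pvFirsts cs := by
  unfold pvFirsts; rw [pvSplit_space c cs hs]

theorem pvFirsts_word (c : Char) (cs : List Char) (hs : ¬ PySem.Chars.isspace c = true) :
    pvFirsts (c :: cs) = c :: pvFirsts (cs.dropWhile (fun d => !PySem.Chars.isspace d)) := by
  unfold pvFirsts; rw [pvSplit_word c cs hs]; simp

-- every word produced by Python's whitespace split is non-empty
theorem pvSplitGo_ne_nil (s : List Char) (cur : List Char) (acc : List (List Char))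
    (hacc : ∀ w ∈ acc, w ≠ []) : ∀ w ∈ PySem.Chars.split₀.go s cur acc, w ≠ [] := by
  induction s generalizing cur acc with
  | nil =>
    intro w hw
    unfold PySem.Chars.split₀.go at hw
    by_cases hc : cur.isEmpty = true
    · simp [hc] at hw; exact hacc w hw
    · simp [hc] at hw
      rcases hw with h | h
      · exact hacc w h
      · subst h; simpa [List.isEmpty_iff] using hc
  | cons c rest ih =>
    intro w hw
    unfold PySem.Chars.split₀.go at hw
    by_cases hs : PySem.Chars.isspace c = true
    · by_cases hc : cur.isEmpty = true
      · simp [hs, hc] at hw; exact ih [] acc hacc w hw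
      · simp [hs, hc] at hw
        refine ih [] (cur.reverse :: acc) ?_ w hw
        intro u hu
        rcases List.mem_cons.mp hu with h | h
        · subst h; simpa [List.isEmpty_iff] using hc
        · exact hacc u h
    · simp [hs] at hw
      exact ih (c :: cur) acc hacc w hw

theorem pvSplit_ne_nil (s : List Char) : ∀ w ∈ PySem.Chars.split₀ s, w ≠ [] := by
  intro w hw
  exact pvSplitGo_ne_nil s [] [] (by simp) w hw

-- A's early-exit loop is a List.all over the index range
theorem pvALoop_eq_all (words : List (List Char)) (v : List Char) (r : List Int) :
    pvALoop words v r =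
      r.all (fun x => PySem.List.pyGet? ((PySem.List.pyGet? words x).getD []) 0
                        == PySem.List.pyGet? v x) := by
  induction r with
  | nil => rfl
  | cons x xs ih =>
    simp only [pvALoop, List.all_cons]
    by_cases h : PySem.List.pyGet? ((PySem.List.pyGet? words x).getD []) 0 = PySem.List.pyGet? v x
    · simp [h, ih]
    · simp [h]

-- A computes exactly 'first letters = validation'
theorem pvA_char (message validation : String) :
    is_valid_message message validation =
      (pvFirsts (PySem.Chars.lower message.toList) == PySem.Chars.lower validation.toList) := by
  unfold is_valid_message
  set ws := PySem.Chars.split₀ (PySem.Chars.lower message.toList) with hws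
  set v := PySem.Chars.lower validation.toList with hv
  have hne : ∀ w ∈ ws, w ≠ [] := pvSplit_ne_nil _
  have hfe : pvFirsts (PySem.Chars.lower message.toList) = ws.map (fun w => w.headD ' ') := rfl
  rw [hfe]
  by_cases hlen : ws.length = v.length
  · simp only [hlen, ne_eq, not_true_eq_false, if_false]
    rw [show ((v.length : Int)) = ((v.length : Nat) : Int) from rfl,
        PySem.List.pyRange_zero_natCast, pvALoop_eq_all, List.all_map]
    have hwlen : ∀ i, i < v.length → i < ws.length := by omega
    have hpoint : ∀ i (hi : i < v.length),
        (PySem.List.pyGet? ((PySem.List.pyGet? ws (i : Int)).getD []) 0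
          == PySem.List.pyGet? v (i : Int)) = true
        ↔ (ws[i]'(hwlen i hi)).headD ' ' = v[i] := by
      intro i hi
      have hw : i < ws.length := hwlen i hi
      have hnn : ws[i] ≠ [] := hne _ (List.getElem_mem hw)
      rw [PySem.List.pyGet?_natCast, PySem.List.pyGet?_natCast,
          List.getElem?_eq_getElem hw, List.getElem?_eq_getElem hi]
      cases h0 : ws[i] with
      | nil => exact absurd h0 hnn
      | cons c cs => simp
    rw [Bool.eq_iff_iff]
    simp only [List.all_eq_true, List.mem_range, beq_iff_eq]
    constructor
    · intro h
      apply List.ext_getElem (by simp [hlen])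
      intro i h1 h2
      have hi : i < v.length := h2
      rw [List.getElem_map]
      exact (hpoint i hi).mp (h i hi)
    · intro h i hi
      refine (hpoint i hi).mpr ?_
      have h2 : (ws.map (fun w => w.headD ' '))[i]'(by simp [hlen]; exact hi) = v[i] :=
        List.getElem_of_eq h _
      rw [List.getElem_map] at h2
      exact h2
  · have hfalse : (ws.map (fun w => w.headD ' ') == v) = false := by
      rw [beq_eq_false_iff_ne]
      intro h
      exact hlen (by simpa using congrArg List.length h)
    rw [if_pos hlen, hfalse]

-- the in-word state skips the rest of the current word
theorem pvBScan_true (v : List Char) (s : List Char) (k : Nat) :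
    pvBScan v s k true = pvBScan v (s.dropWhile (fun d => !PySem.Chars.isspace d)) k false := by
  induction s with
  | nil => rfl
  | cons c cs ih =>
    by_cases hs : PySem.Chars.isspace c = true
    · simp [pvBScan, hs]
    · simp [pvBScan, hs, ih]

-- the scan from cursor k computes 'remaining first letters = remaining validation'
theorem pvBScan_false (v : List Char) : ∀ (s : List Char) (k : Nat), k ≤ v.length →
    pvBScan v s k false = (pvFirsts s == v.drop k) := by
  intro s
  induction hn : s.length using Nat.strong_induction_on generalizing s with
  | _ n ih =>
    subst hn
    cases s with
    | nil =>
      intro k hk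
      simp only [pvBScan, pvFirsts_nil]
      rw [Bool.eq_iff_iff]
      simp only [beq_iff_eq]
      constructor
      · intro h; simp [h]
      · intro h
        have := congrArg List.length h
        simp at this
        omega
    | cons c cs =>
      intro k hk
      by_cases hs : PySem.Chars.isspace c = true
      · simp only [pvBScan, hs, if_true]
        rw [ih cs.length (by simp) cs rfl k hk, pvFirsts_space c cs hs]
      · simp only [pvBScan, hs, if_false, Bool.false_eq_true]
        rw [pvFirsts_word c cs hs]
        by_cases hkl : k < v.length
        · rw [PySem.List.pyGet?_natCast, List.getElem?_eq_getElem hkl]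
          simp only
          rw [List.drop_eq_getElem_cons hkl]
          by_cases hc : c = v[k]
          · simp only [hc, ne_eq, not_true_eq_false, if_false]
            rw [pvBScan_true,
                ih (cs.dropWhile (fun d => !PySem.Chars.isspace d)).length
                  (by have := List.length_dropWhile_le (fun d => !PySem.Chars.isspace d) cs
                      simp only [List.length_cons]; omega)
                  _ rfl (k + 1) (by omega)]
            rw [Bool.eq_iff_iff]
            simp only [beq_iff_eq, List.cons.injEq, true_and]
          · simp only [ne_eq, hc, not_false_eq_true, if_true]
            rw [Bool.eq_iff_iff]
            simp only [Bool.false_eq_true, false_iff, beq_iff_eq]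
            intro h
            exact hc (by injection h)
        · have hke : k = v.length := by omega
          rw [PySem.List.pyGet?_natCast, List.getElem?_eq_none (by omega)]
          simp [hke, List.drop_length]

-- ===== VERDICT (by name: the statement is the Claim_ definition above) =====
theorem is_valid_message_spec : Claim_equal_is_valid_message := by
  intro message validation _
  unfold Spec_is_valid_message is_valid_message_alt
  rw [pvA_char, pvBScan_false _ _ 0 (by omega)]
  simp
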